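-- pv_equiv track=rewrite | github.com/Masteradilio/risco_bancario | backend/agente/permissions.py | get_allowed_tools
-- ===== SOURCE A (Python) =====
-- from enum import Enum
-- from typing import List, Set
--
-- class UserRole(str, Enum):
--     """Perfis de acesso do sistema."""
--     ANALISTA = "ANALISTA"
--     GESTOR = "GESTOR"
--     AUDITOR = "AUDITOR"
--     ADMIN = "ADMIN"
--
-- TOOL_PERMISSIONS = {
--     # -------------------------------------------------------------------------
--     # Ferramentas de Consulta (Todas as roles)
--     # -------------------------------------------------------------------------
--     "consultar_score_prinad": [UserRole.ANALISTA, UserRole.GESTOR, UserRole.AUDITOR, UserRole.ADMIN],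
--     "buscar_cliente": [UserRole.ANALISTA, UserRole.GESTOR, UserRole.AUDITOR, UserRole.ADMIN],
--     "buscar_regulamentacao": [UserRole.ANALISTA, UserRole.GESTOR, UserRole.AUDITOR, UserRole.ADMIN],
--     "consultar_ecl_contrato": [UserRole.ANALISTA, UserRole.GESTOR, UserRole.AUDITOR, UserRole.ADMIN],
--     "listar_grupos_homogeneos": [UserRole.ANALISTA, UserRole.GESTOR, UserRole.AUDITOR, UserRole.ADMIN],
--     "consultar_taxa_recuperacao": [UserRole.ANALISTA, UserRole.GESTOR, UserRole.AUDITOR, UserRole.ADMIN],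
--
--     # -------------------------------------------------------------------------
--     # Ferramentas de Cálculo/Simulação (Analista+)
--     # -------------------------------------------------------------------------
--     "calcular_ecl_individual": [UserRole.ANALISTA, UserRole.GESTOR, UserRole.ADMIN],
--     "calcular_ecl_portfolio": [UserRole.ANALISTA, UserRole.GESTOR, UserRole.ADMIN],
--     "simular_cenario_forward_looking": [UserRole.ANALISTA, UserRole.GESTOR, UserRole.ADMIN],
--     "classificar_estagio": [UserRole.ANALISTA, UserRole.GESTOR, UserRole.ADMIN],
--     "analisar_cura": [UserRole.ANALISTA, UserRole.GESTOR, UserRole.ADMIN],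
--
--     # -------------------------------------------------------------------------
--     # Ferramentas de Exportação/Relatório (Gestor+)
--     # -------------------------------------------------------------------------
--     "exportar_xml_bacen": [UserRole.GESTOR, UserRole.ADMIN],
--     "aprovar_exportacao_bacen": [UserRole.GESTOR, UserRole.ADMIN],
--     "gerar_relatorio_ecl": [UserRole.GESTOR, UserRole.AUDITOR, UserRole.ADMIN],
--     "executar_pipeline_ecl": [UserRole.GESTOR, UserRole.ADMIN],
--
--     # -------------------------------------------------------------------------
--     # Ferramentas de Auditoria (Auditor+)
--     # -------------------------------------------------------------------------
--     "gerar_relatorio_auditoria": [UserRole.AUDITOR, UserRole.ADMIN],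
--     "consultar_logs_atividade": [UserRole.AUDITOR, UserRole.ADMIN],
--     "exportar_evidencias_bacen": [UserRole.AUDITOR, UserRole.ADMIN],
--     "validar_conformidade": [UserRole.AUDITOR, UserRole.ADMIN],
--
--     # -------------------------------------------------------------------------
--     # Ferramentas Administrativas (Admin only)
--     # -------------------------------------------------------------------------
--     "gerenciar_usuarios": [UserRole.ADMIN],
--     "configurar_sistema": [UserRole.ADMIN],
--     "visualizar_logs_sistema": [UserRole.ADMIN],
--
--     # -------------------------------------------------------------------------
--     # Ferramentas Auxiliares (Todas as roles)
--     # -------------------------------------------------------------------------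
--     "ler_arquivo_excel": [UserRole.ANALISTA, UserRole.GESTOR, UserRole.AUDITOR, UserRole.ADMIN],
--     "escrever_arquivo_excel": [UserRole.ANALISTA, UserRole.GESTOR, UserRole.ADMIN],
--     "ler_arquivo_pdf": [UserRole.ANALISTA, UserRole.GESTOR, UserRole.AUDITOR, UserRole.ADMIN],
--     "gerar_grafico": [UserRole.ANALISTA, UserRole.GESTOR, UserRole.AUDITOR, UserRole.ADMIN],
--     "pesquisar_web": [UserRole.ANALISTA, UserRole.GESTOR, UserRole.AUDITOR, UserRole.ADMIN],
-- }
--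
-- def get_allowed_tools(user_role: str) -> List[str]:
--     """
--     Retorna lista de ferramentas permitidas para o role.
--
--     Args:
--         user_role: Role do usuário
--
--     Returns:
--         Lista de nomes de ferramentas permitidas
--     """
--     if isinstance(user_role, str):
--         try:
--             user_role = UserRole(user_role.upper())
--         except ValueError:
--             return []
--
--     allowed = []
--     for tool_name, roles in TOOL_PERMISSIONS.items():
--         if user_role in roles:
--             allowed.append(tool_name)
--
--     return sorted(allowed)
-- ===== SOURCE B (Python) =====
-- # B: the permission data re-represented directly as a role -> sorted tool list
-- # table (the inverse of A's tool -> roles dict); a call is one dict lookup.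
-- from typing import List
--
-- ROLE_TO_TOOLS = {
--     "ANALISTA": ["analisar_cura", "buscar_cliente", "buscar_regulamentacao", "calcular_ecl_individual", "calcular_ecl_portfolio", "classificar_estagio", "consultar_ecl_contrato", "consultar_score_prinad", "consultar_taxa_recuperacao", "escrever_arquivo_excel", "gerar_grafico", "ler_arquivo_excel", "ler_arquivo_pdf", "listar_grupos_homogeneos", "pesquisar_web", "simular_cenario_forward_looking"],
--     "GESTOR": ["analisar_cura", "aprovar_exportacao_bacen", "buscar_cliente", "buscar_regulamentacao", "calcular_ecl_individual", "calcular_ecl_portfolio", "classificar_estagio", "consultar_ecl_contrato", "consultar_score_prinad", "consultar_taxa_recuperacao", "escrever_arquivo_excel", "executar_pipeline_ecl", "exportar_xml_bacen", "gerar_grafico", "gerar_relatorio_ecl", "ler_arquivo_excel", "ler_arquivo_pdf", "listar_grupos_homogeneos", "pesquisar_web", "simular_cenario_forward_looking"],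
--     "AUDITOR": ["buscar_cliente", "buscar_regulamentacao", "consultar_ecl_contrato", "consultar_logs_atividade", "consultar_score_prinad", "consultar_taxa_recuperacao", "exportar_evidencias_bacen", "gerar_grafico", "gerar_relatorio_auditoria", "gerar_relatorio_ecl", "ler_arquivo_excel", "ler_arquivo_pdf", "listar_grupos_homogeneos", "pesquisar_web", "validar_conformidade"],
--     "ADMIN": ["analisar_cura", "aprovar_exportacao_bacen", "buscar_cliente", "buscar_regulamentacao", "calcular_ecl_individual", "calcular_ecl_portfolio", "classificar_estagio", "configurar_sistema", "consultar_ecl_contrato", "consultar_logs_atividade", "consultar_score_prinad", "consultar_taxa_recuperacao", "escrever_arquivo_excel", "executar_pipeline_ecl", "exportar_evidencias_bacen", "exportar_xml_bacen", "gerar_grafico", "gerar_relatorio_auditoria", "gerar_relatorio_ecl", "gerenciar_usuarios", "ler_arquivo_excel", "ler_arquivo_pdf", "listar_grupos_homogeneos", "pesquisar_web", "simular_cenario_forward_looking", "validar_conformidade", "visualizar_logs_sistema"],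
-- }
--
-- def get_allowed_tools(user_role: str) -> List[str]:
--     if isinstance(user_role, str):
--         user_role = user_role.upper()
--     return list(ROLE_TO_TOOLS.get(user_role, []))
-- ===== Notes on version B (the rewrite author's own statement) =====
-- stated objective: idiomatic
-- what changed: B stores the permission data inverted as a literal ROLE_TO_TOOLS table (role -> sorted tool list), so each call is a single dict lookup with a [] fallback instead of A's per-call scan of all 27 tool entries followed by a sort.
import Mathlib
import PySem

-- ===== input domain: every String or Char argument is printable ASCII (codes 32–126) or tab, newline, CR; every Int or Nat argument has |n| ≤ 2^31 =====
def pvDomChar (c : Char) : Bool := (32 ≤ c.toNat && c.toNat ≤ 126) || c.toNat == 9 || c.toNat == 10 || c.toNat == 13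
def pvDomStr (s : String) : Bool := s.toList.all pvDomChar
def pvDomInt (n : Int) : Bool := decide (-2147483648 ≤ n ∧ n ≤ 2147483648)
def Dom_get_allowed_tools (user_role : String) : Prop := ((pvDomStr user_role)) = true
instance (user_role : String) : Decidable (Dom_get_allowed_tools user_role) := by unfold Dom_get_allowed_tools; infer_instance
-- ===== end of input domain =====

-- B re-represents the permission data as a direct role -> sorted tool list table,
-- so a call is one dict lookup instead of A's per-call scan of all tools plus a sort.

-- ===== PORT A =====
-- TOOL_PERMISSIONS, UserRole members represented by their string values
def TOOL_PERMISSIONS : List (String × List String) := [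
  ("consultar_score_prinad", ["ANALISTA", "GESTOR", "AUDITOR", "ADMIN"]),
  ("buscar_cliente", ["ANALISTA", "GESTOR", "AUDITOR", "ADMIN"]),
  ("buscar_regulamentacao", ["ANALISTA", "GESTOR", "AUDITOR", "ADMIN"]),
  ("consultar_ecl_contrato", ["ANALISTA", "GESTOR", "AUDITOR", "ADMIN"]),
  ("listar_grupos_homogeneos", ["ANALISTA", "GESTOR", "AUDITOR", "ADMIN"]),
  ("consultar_taxa_recuperacao", ["ANALISTA", "GESTOR", "AUDITOR", "ADMIN"]),
  ("calcular_ecl_individual", ["ANALISTA", "GESTOR", "ADMIN"]),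
  ("calcular_ecl_portfolio", ["ANALISTA", "GESTOR", "ADMIN"]),
  ("simular_cenario_forward_looking", ["ANALISTA", "GESTOR", "ADMIN"]),
  ("classificar_estagio", ["ANALISTA", "GESTOR", "ADMIN"]),
  ("analisar_cura", ["ANALISTA", "GESTOR", "ADMIN"]),
  ("exportar_xml_bacen", ["GESTOR", "ADMIN"]),
  ("aprovar_exportacao_bacen", ["GESTOR", "ADMIN"]),
  ("gerar_relatorio_ecl", ["GESTOR", "AUDITOR", "ADMIN"]),
  ("executar_pipeline_ecl", ["GESTOR", "ADMIN"]),
  ("gerar_relatorio_auditoria", ["AUDITOR", "ADMIN"]),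
  ("consultar_logs_atividade", ["AUDITOR", "ADMIN"]),
  ("exportar_evidencias_bacen", ["AUDITOR", "ADMIN"]),
  ("validar_conformidade", ["AUDITOR", "ADMIN"]),
  ("gerenciar_usuarios", ["ADMIN"]),
  ("configurar_sistema", ["ADMIN"]),
  ("visualizar_logs_sistema", ["ADMIN"]),
  ("ler_arquivo_excel", ["ANALISTA", "GESTOR", "AUDITOR", "ADMIN"]),
  ("escrever_arquivo_excel", ["ANALISTA", "GESTOR", "ADMIN"]),
  ("ler_arquivo_pdf", ["ANALISTA", "GESTOR", "AUDITOR", "ADMIN"]),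
  ("gerar_grafico", ["ANALISTA", "GESTOR", "AUDITOR", "ADMIN"]),
  ("pesquisar_web", ["ANALISTA", "GESTOR", "AUDITOR", "ADMIN"])]

-- UserRole(user_role.upper()): succeeds iff the uppercased string is a member value,
-- else ValueError and the function returns []
def get_allowed_tools (user_role : String) : List String :=
  let u := PySem.Str.upper user_role
  if u = "ANALISTA" ∨ u = "GESTOR" ∨ u = "AUDITOR" ∨ u = "ADMIN" then
    PySem.List.sorted
      (TOOL_PERMISSIONS.foldl
        (fun allowed p => if u ∈ p.2 then allowed ++ [p.1] else allowed) [])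
      (fun x => x) false
  else []

-- ===== PORT B =====
-- ROLE_TO_TOOLS: the literal role -> sorted tool list table from Source B
def ROLE_TO_TOOLS : PySem.Dict String (List String) := PySem.Dict.ofList [
  ("ANALISTA", ["analisar_cura", "buscar_cliente", "buscar_regulamentacao", "calcular_ecl_individual", "calcular_ecl_portfolio", "classificar_estagio", "consultar_ecl_contrato", "consultar_score_prinad", "consultar_taxa_recuperacao", "escrever_arquivo_excel", "gerar_grafico", "ler_arquivo_excel", "ler_arquivo_pdf", "listar_grupos_homogeneos", "pesquisar_web", "simular_cenario_forward_looking"]),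
  ("GESTOR", ["analisar_cura", "aprovar_exportacao_bacen", "buscar_cliente", "buscar_regulamentacao", "calcular_ecl_individual", "calcular_ecl_portfolio", "classificar_estagio", "consultar_ecl_contrato", "consultar_score_prinad", "consultar_taxa_recuperacao", "escrever_arquivo_excel", "executar_pipeline_ecl", "exportar_xml_bacen", "gerar_grafico", "gerar_relatorio_ecl", "ler_arquivo_excel", "ler_arquivo_pdf", "listar_grupos_homogeneos", "pesquisar_web", "simular_cenario_forward_looking"]),
  ("AUDITOR", ["buscar_cliente", "buscar_regulamentacao", "consultar_ecl_contrato", "consultar_logs_atividade", "consultar_score_prinad", "consultar_taxa_recuperacao", "exportar_evidencias_bacen", "gerar_grafico", "gerar_relatorio_auditoria", "gerar_relatorio_ecl", "ler_arquivo_excel", "ler_arquivo_pdf", "listar_grupos_homogeneos", "pesquisar_web", "validar_conformidade"]),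
  ("ADMIN", ["analisar_cura", "aprovar_exportacao_bacen", "buscar_cliente", "buscar_regulamentacao", "calcular_ecl_individual", "calcular_ecl_portfolio", "classificar_estagio", "configurar_sistema", "consultar_ecl_contrato", "consultar_logs_atividade", "consultar_score_prinad", "consultar_taxa_recuperacao", "escrever_arquivo_excel", "executar_pipeline_ecl", "exportar_evidencias_bacen", "exportar_xml_bacen", "gerar_grafico", "gerar_relatorio_auditoria", "gerar_relatorio_ecl", "gerenciar_usuarios", "ler_arquivo_excel", "ler_arquivo_pdf", "listar_grupos_homogeneos", "pesquisar_web", "simular_cenario_forward_looking", "validar_conformidade", "visualizar_logs_sistema"])]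

-- ROLE_TO_TOOLS.get(user_role.upper(), []) (list(...) copies; identity on values here)
def get_allowed_tools_alt (user_role : String) : List String :=
  ROLE_TO_TOOLS.getD (PySem.Str.upper user_role) []

-- ===== PRECONDITION & SPEC =====
def Spec_get_allowed_tools (user_role : String) (out : List String) : Prop := out = get_allowed_tools_alt user_role
instance (user_role : String) (out : List String) : Decidable (Spec_get_allowed_tools user_role out) := by unfold Spec_get_allowed_tools; infer_instance

-- ===== CLAIM (what is proved, stated in full; the proofs are below) =====
def Claim_equal_get_allowed_tools : Prop := ∀ (user_role : String), Dom_get_allowed_tools user_role → Spec_get_allowed_tools user_role (get_allowed_tools user_role)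

-- ===== LEMMAS AND PROOFS =====
set_option maxRecDepth 100000
set_option maxHeartbeats 2000000

theorem keys_ROLE_TO_TOOLS : ROLE_TO_TOOLS.keys = ["ANALISTA", "GESTOR", "AUDITOR", "ADMIN"] := by rfl

theorem sorted_ANALISTA :
    PySem.List.sorted
      (TOOL_PERMISSIONS.foldl
        (fun allowed p => if "ANALISTA" ∈ p.2 then allowed ++ [p.1] else allowed) [])
      (fun x => x) false = ROLE_TO_TOOLS.getD "ANALISTA" [] := by
  simp [PySem.List.sorted_eq_foldl_insertBy, TOOL_PERMISSIONS]
  decide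

theorem sorted_GESTOR :
    PySem.List.sorted
      (TOOL_PERMISSIONS.foldl
        (fun allowed p => if "GESTOR" ∈ p.2 then allowed ++ [p.1] else allowed) [])
      (fun x => x) false = ROLE_TO_TOOLS.getD "GESTOR" [] := by
  simp [PySem.List.sorted_eq_foldl_insertBy, TOOL_PERMISSIONS]
  decide

theorem sorted_AUDITOR :
    PySem.List.sorted
      (TOOL_PERMISSIONS.foldl
        (fun allowed p => if "AUDITOR" ∈ p.2 then allowed ++ [p.1] else allowed) [])
      (fun x => x) false = ROLE_TO_TOOLS.getD "AUDITOR" [] := by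
  simp [PySem.List.sorted_eq_foldl_insertBy, TOOL_PERMISSIONS]
  decide

theorem sorted_ADMIN :
    PySem.List.sorted
      (TOOL_PERMISSIONS.foldl
        (fun allowed p => if "ADMIN" ∈ p.2 then allowed ++ [p.1] else allowed) [])
      (fun x => x) false = ROLE_TO_TOOLS.getD "ADMIN" [] := by
  simp [PySem.List.sorted_eq_foldl_insertBy, TOOL_PERMISSIONS]
  decide

-- Both programs depend on the input only through its uppercased form.
theorem eq_on_upper (u : String) :
    (if u = "ANALISTA" ∨ u = "GESTOR" ∨ u = "AUDITOR" ∨ u = "ADMIN" then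
      PySem.List.sorted
        (TOOL_PERMISSIONS.foldl
          (fun allowed p => if u ∈ p.2 then allowed ++ [p.1] else allowed) [])
        (fun x => x) false
    else []) = ROLE_TO_TOOLS.getD u [] := by
  by_cases h1 : u = "ANALISTA"
  · subst h1; rw [if_pos (by decide)]; exact sorted_ANALISTA
  by_cases h2 : u = "GESTOR"
  · subst h2; rw [if_pos (by decide)]; exact sorted_GESTOR
  by_cases h3 : u = "AUDITOR"
  · subst h3; rw [if_pos (by decide)]; exact sorted_AUDITOR
  by_cases h4 : u = "ADMIN"
  · subst h4; rw [if_pos (by decide)]; exact sorted_ADMIN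
  rw [if_neg (by simp [h1, h2, h3, h4])]
  have hc : ROLE_TO_TOOLS.contains u = false := by
    rw [PySem.Dict.contains_eq_decide_mem_keys, keys_ROLE_TO_TOOLS]
    simp [h1, h2, h3, h4]
  simp [PySem.Dict.getD_of_not_contains, hc]

-- ===== VERDICT (by name: the statement is the Claim_ definition above) =====
theorem get_allowed_tools_spec : Claim_equal_get_allowed_tools := by
  intro user_role _
  unfold Spec_get_allowed_tools get_allowed_tools get_allowed_tools_alt
  exact eq_on_upper (PySem.Str.upper user_role)
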